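-- pv_equiv track=rewrite | github.com/ernestojfcosta/IPRP_LIVRO_2013_06 | recursividade/programas/permuta.py | permuta_2
-- ===== SOURCE A (Python) =====
-- def permuta_2(lst):
-- 	if lst == []:
-- 		return [[]]
-- 	else:
-- 		resp= []
-- 		for perm in permuta_2(lst[1:]):
-- 			for pos in range(len(perm) +1):
-- 				resp.append(perm[:pos] + [lst[0]] + perm[pos:])
-- 		return resp
-- ===== SOURCE B (Python) =====
-- def permuta_2(lst):
--     result = [[]]
--     for x in reversed(lst):
--         result = [perm[:pos] + [x] + perm[pos:]
--                   for perm in result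
--                   for pos in range(len(perm) + 1)]
--     return result
-- ===== Notes on version B (the rewrite author's own statement) =====
-- stated objective: alternative
-- what changed: Replaces the recursion on the list tail by an iterative loop over reversed(lst) that rebuilds the permutation list with a comprehension at each step.
import Mathlib
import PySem

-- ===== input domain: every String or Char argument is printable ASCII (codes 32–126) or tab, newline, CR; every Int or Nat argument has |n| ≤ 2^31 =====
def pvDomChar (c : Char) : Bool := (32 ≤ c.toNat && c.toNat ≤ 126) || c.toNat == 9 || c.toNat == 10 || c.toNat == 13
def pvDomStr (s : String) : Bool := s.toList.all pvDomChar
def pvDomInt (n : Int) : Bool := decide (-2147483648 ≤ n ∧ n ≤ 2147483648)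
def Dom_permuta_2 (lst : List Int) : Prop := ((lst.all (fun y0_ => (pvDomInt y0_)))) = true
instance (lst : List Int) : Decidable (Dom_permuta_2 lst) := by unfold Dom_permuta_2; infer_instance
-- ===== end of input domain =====

-- ===== PORT A =====
-- Header: A recurses on the tail; B iterates over reversed(lst) rebuilding the list each step (alternative decomposition, same cost).
def permuta_2 : List Int → List (List Int)
  | [] => [[]]
  | x :: rest =>
    (permuta_2 rest).foldl (fun resp perm =>
      (PySem.List.pyRange 0 (perm.length + 1) 1).foldl (fun resp pos =>
        resp ++ [PySem.List.slice perm none (some pos) ++ [x] ++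
                 PySem.List.slice perm (some pos) none]) resp) []

-- ===== PORT B =====
def pvStep (x : Int) (result : List (List Int)) : List (List Int) :=
  result.flatMap (fun perm =>
    (PySem.List.pyRange 0 (perm.length + 1) 1).map (fun pos =>
      PySem.List.slice perm none (some pos) ++ [x] ++
      PySem.List.slice perm (some pos) none))

def permuta_2_alt (lst : List Int) : List (List Int) :=
  lst.reverse.foldl (fun result x => pvStep x result) [[]]

-- ===== PRECONDITION & SPEC =====
def Spec_permuta_2 (lst : List Int) (out : List (List Int)) : Prop := out = permuta_2_alt lst
instance (lst : List Int) (out : List (List Int)) : Decidable (Spec_permuta_2 lst out) := by unfold Spec_permuta_2; infer_instance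

-- ===== CLAIM (what is proved, stated in full; the proofs are below) =====
def Claim_equal_permuta_2 : Prop := ∀ (lst : List Int), Dom_permuta_2 lst → Spec_permuta_2 lst (permuta_2 lst)

-- ===== LEMMAS AND PROOFS =====

theorem permuta_2_cons (x : Int) (rest : List Int) :
    permuta_2 (x :: rest) = pvStep x (permuta_2 rest) := by
  simp only [permuta_2, pvStep, PySem.List.foldl_append_singleton_eq_map,
    PySem.List.foldl_append_eq_flatMap]
  simp

theorem permuta_2_alt_eq_foldr (lst : List Int) :
    permuta_2_alt lst = lst.foldr pvStep [[]] := by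
  simp [permuta_2_alt, List.foldl_reverse]

-- ===== VERDICT (by name: the statement is the Claim_ definition above) =====
theorem permuta_2_spec : Claim_equal_permuta_2 := by
  intro lst h
  clear h
  unfold Spec_permuta_2
  rw [permuta_2_alt_eq_foldr]
  induction lst with
  | nil => rfl
  | cons x rest ih => rw [permuta_2_cons, ih]; rfl
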